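-- pv_equiv track=rewrite | github.com/phord/cryptopals | mycrypto.py | find_byte_key
-- ===== SOURCE A (Python) =====
-- most_common_letters=' etaoinsrhld\ncumfpgwybvkxjqz'
--
-- digits='0123456789'
--
-- printable=[chr(32+i) for i in range(96)] + ['\n']
--
-- def binxorbyte(bin,ky):
--     return [a^ky for a in bin]
--
-- def find_byte_key(bin):
--     """ Examines the bytes in a binary msg and tries to determine the most likely byte all bytes were
--     xored with assuming that the original message was some English language ASCII.  The results are
--     returned in an array of tuples of (Score, XOR-candidate, [Decoded-bytes, ...]).  The score is the
--     measure of how good a match this XOR-candidate seems to be (producing printable letters). The array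
--     is sorted with the highest scores at the beginning.
--     """
--     histo = [(bin.count(x),x) for x in set(bin)]
--     histo.sort(reverse=True)
--
--     results = []
--     keys = [a[1]^ord(b) for a in histo for b in most_common_letters]
--     for ky in set(keys):
--         msg = binxorbyte(bin, ky)
--         score = score_readable(msg)
--         results.append((score, ky, msg))
--
--     results.sort(reverse=True)
--     return results
--
-- def score_letter(x):
--     if chr(x) in most_common_letters:
--         return len(most_common_letters) - most_common_letters.find(chr(x))
--     return 0
--
-- def score_printable(x):
--     score = score_letter(x)
--     if chr(x) in digits:
--         score += 15
--     elif chr(x) in printable: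
--         score += 5
--     else:
--         score = -1
--     return score
--
-- def score_readable(bin):
--     scores = [score_printable(x) for x in bin]
--     # if len([x for x in scores if x<0]):
--     #     return -1000
--     return sum(scores)
-- ===== SOURCE B (Python) =====
-- most_common_letters = ' etaoinsrhld\ncumfpgwybvkxjqz'
--
-- # score of each favoured letter, keyed by its code point (first index wins, as str.find does)
-- _letter_score = {}
-- for _i, _c in enumerate(most_common_letters):
--     _letter_score.setdefault(ord(_c), len(most_common_letters) - _i)
--
--
-- def _score(x):
--     s = _letter_score.get(x, 0)
--     if 48 <= x <= 57:
--         return s + 15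
--     if 32 <= x <= 127 or x == 10:
--         return s + 5
--     return -1
--
--
-- def find_byte_key(bin):
--     counts = {}
--     for a in bin:
--         counts[a] = counts.get(a, 0) + 1
--     results = []
--     seen = set()
--     for v in counts:
--         for c in most_common_letters:
--             ky = v ^ ord(c)
--             if ky not in seen:
--                 seen.add(ky)
--                 score = sum(n * _score(w ^ ky) for w, n in counts.items())
--                 results.append((score, ky, [a ^ ky for a in bin]))
--     results.sort(reverse=True)
--     return results
-- ===== Notes on version B (the rewrite author's own statement) =====
-- stated objective: faster
-- what changed: B replaces A's per-key rescan of the whole decoded message (and per-value bin.count scan) by a byte-value counter built once: each candidate key is scored as sum(count[v] * score(v ^ ky)) over the distinct values, with keys deduplicated on the fly by a seen-set, and the letter scores held in a dict instead of repeated str.find calls.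
import Mathlib
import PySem

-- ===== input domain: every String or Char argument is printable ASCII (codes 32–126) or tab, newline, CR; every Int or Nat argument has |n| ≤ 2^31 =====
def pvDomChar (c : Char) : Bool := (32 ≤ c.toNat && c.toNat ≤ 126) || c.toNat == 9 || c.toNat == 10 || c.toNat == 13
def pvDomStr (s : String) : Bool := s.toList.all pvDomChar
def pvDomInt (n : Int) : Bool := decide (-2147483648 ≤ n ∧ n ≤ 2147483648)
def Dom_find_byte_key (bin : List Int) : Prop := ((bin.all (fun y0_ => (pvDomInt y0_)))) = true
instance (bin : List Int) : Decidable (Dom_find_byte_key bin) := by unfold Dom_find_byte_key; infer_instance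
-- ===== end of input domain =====

-- B scores each candidate key from a byte-value counter (count[v] * score(v^ky) over distinct
-- values, keys deduplicated on the fly) instead of A's per-key rescan of the decoded message;
-- measurably faster (constant-factor: O(K·d) instead of O(K·n) scoring work).

-- ===== PORT A =====
-- code points of most_common_letters = ' etaoinsrhld\ncumfpgwybvkxjqz' (length 28)
def pvLetters : List Int :=
  [32, 101, 116, 97, 111, 105, 110, 115, 114, 104, 108, 100, 10, 99, 117,
   109, 102, 112, 103, 119, 121, 98, 118, 107, 120, 106, 113, 122]

-- code points of digits = '0123456789'
def pvDigits : List Int := [48, 49, 50, 51, 52, 53, 54, 55, 56, 57]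

-- printable = [chr(32+i) for i in range(96)] + ['\n'], as code points
def pvPrintable : List Int := (PySem.List.pyRange 0 96).map (fun i => 32 + i) ++ [10]

-- 'chr(x) in <string const>' and '<string const>.find(chr(x))' are ported as membership/index
-- in the corresponding code-point list: exact on Pre_ (chr is injective where it is defined)
def pvScoreLetter (x : Int) : Int :=
  if pvLetters.contains x then (28 : Int) - ((PySem.List.index? pvLetters x).getD 0 : Nat)
  else 0

def pvScorePrintable (x : Int) : Int :=
  let score := pvScoreLetter x
  if pvDigits.contains x then score + 15
  else if pvPrintable.contains x then score + 5
  else -1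

def pvScoreReadable (msg : List Int) : Int := (msg.map pvScorePrintable).sum

def pvBinxorbyte (bin : List Int) (ky : Int) : List Int :=
  bin.map (fun a => PySem.Int.bxor a ky)

-- histo is a sort of a list built by iterating set(bin); Python's set iteration order is not
-- modelled, but the full sorts (injective second key) make the end result order-independent.
-- Sorting the (count, x) pairs resp. (score, ky, msg) triples via sorted2 on the first two
-- components is exact: the x resp. ky are pairwise distinct, so Python never compares further.
def find_byte_key (bin : List Int) : List (Int × Int × List Int) :=
  let histo := PySem.List.sorted2
    ((PySem.Set.ofList bin).map (fun x => ((bin.count x : Int), x)))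
    (fun p => p.1) (fun p => p.2) true
  let keys := histo.flatMap (fun a => pvLetters.map (fun b => PySem.Int.bxor a.2 b))
  let results := (PySem.Set.ofList keys).foldl (fun rs ky =>
    let msg := pvBinxorbyte bin ky
    let score := pvScoreReadable msg
    rs ++ [(score, ky, msg)]) []
  PySem.List.sorted2 results (fun t => t.1) (fun t => t.2.1) true

-- ===== PORT B =====
-- _letter_score: first index wins (setdefault), keyed by code point
def pvLetterScoreDict : PySem.Dict Int Int :=
  (PySem.List.enumerate pvLetters).foldl
    (fun d p => d.setdefault p.2 (28 - p.1)) PySem.Dict.empty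

def pvScoreB (x : Int) : Int :=
  let s := pvLetterScoreDict.getD x 0
  if 48 ≤ x ∧ x ≤ 57 then s + 15
  else if (32 ≤ x ∧ x ≤ 127) ∨ x = 10 then s + 5
  else -1

def find_byte_key_alt (bin : List Int) : List (Int × Int × List Int) :=
  let counts := bin.foldl (fun d a => d.insert a (d.getD a 0 + 1)) PySem.Dict.empty
  let st := counts.keys.foldl (fun (st : PySem.Set Int × List (Int × Int × List Int)) v =>
    pvLetters.foldl (fun st c =>
      let ky := PySem.Int.bxor v c
      if st.1.contains ky then st
      else (st.1.add ky,
            st.2 ++ [((counts.items.map (fun p => p.2 * pvScoreB (PySem.Int.bxor p.1 ky))).sum,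
                      ky, bin.map (fun a => PySem.Int.bxor a ky))])) st)
    (PySem.Set.empty, [])
  PySem.List.sorted2 st.2 (fun t => t.1) (fun t => t.2.1) true

-- ===== PRECONDITION & SPEC =====
-- Pre_ excludes exactly the inputs on which Python A raises: chr() is applied to every
-- decoded byte a ^ (b ^ letter) and raises (ValueError/OverflowError) outside [0, 0x110000).
def Pre_find_byte_key (bin : List Int) : Prop :=
  ∀ a ∈ bin, ∀ b ∈ bin, ∀ l ∈ pvLetters,
    0 ≤ PySem.Int.bxor a (PySem.Int.bxor b l) ∧
    PySem.Int.bxor a (PySem.Int.bxor b l) < 1114112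
instance (bin : List Int) : Decidable (Pre_find_byte_key bin) := by
  unfold Pre_find_byte_key; infer_instance

def pvWitness_find_byte_key : List Int := [104, 105]

def Spec_find_byte_key (bin : List Int) (out : List (Int × Int × List Int)) : Prop := out = find_byte_key_alt bin
instance (bin : List Int) (out : List (Int × Int × List Int)) : Decidable (Spec_find_byte_key bin out) := by unfold Spec_find_byte_key; infer_instance

-- ===== CLAIM (what is proved, stated in full; the proofs are below) =====
def Claim_equal_find_byte_key : Prop := ∀ (bin : List Int), Dom_find_byte_key bin → Pre_find_byte_key bin → Spec_find_byte_key bin (find_byte_key bin)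

-- ===== LEMMAS AND PROOFS =====

def pvW {α : Type} (k1 k2 : α → Int) (a b : α) : Prop :=
  ¬ (k1 a < k1 b) ∧ (k1 b < k1 a ∨ ¬ (k2 a < k2 b))

def pvB {α : Type} (k1 k2 : α → Int) (a b : α) : Bool :=
  decide (k1 b < k1 a) || (!decide (k1 a < k1 b) && decide (k2 b < k2 a))

lemma pvB_true {α : Type} (k1 k2 : α → Int) (a b : α) (h : pvB k1 k2 a b = true) :
    k1 b < k1 a ∨ (¬ (k1 a < k1 b) ∧ k2 b < k2 a) := by
  simpa [pvB, Bool.or_eq_true, Bool.and_eq_true, decide_eq_true_eq,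
    Bool.not_eq_true', decide_eq_false_iff_not] using h

lemma pvB_false {α : Type} (k1 k2 : α → Int) (a b : α) (h : pvB k1 k2 a b = false) :
    pvW k1 k2 b a := by
  have := h
  simp only [pvB, Bool.or_eq_false_iff, Bool.and_eq_false_iff, decide_eq_false_iff_not,
    Bool.not_eq_false', decide_eq_true_eq] at this
  unfold pvW
  rcases this with ⟨h1, h2⟩
  rcases h2 with h2 | h2
  · exact ⟨h1, Or.inl (by omega)⟩
  · exact ⟨h1, by omega⟩

lemma pv_insertBy_pw {α : Type} (k1 k2 : α → Int) (x : α) (acc : List α)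
    (h : acc.Pairwise (pvW k1 k2)) :
    (PySem.List.insertBy (pvB k1 k2) x acc).Pairwise (pvW k1 k2) := by
  induction acc with
  | nil =>
    rw [show PySem.List.insertBy (pvB k1 k2) x [] = [x] from rfl]
    exact List.pairwise_singleton _ _
  | cons y ys ih =>
    rcases List.pairwise_cons.1 h with ⟨hy, hys⟩
    by_cases hb : pvB k1 k2 x y = true
    · rw [show PySem.List.insertBy (pvB k1 k2) x (y :: ys)
          = if pvB k1 k2 x y = true then x :: y :: ys else y :: PySem.List.insertBy (pvB k1 k2) x ys
        from rfl, if_pos hb]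
      refine List.pairwise_cons.2 ⟨?_, h⟩
      intro b hbm
      rcases List.mem_cons.1 hbm with rfl | hbm
      · -- pvW x b from pvB x b = true
        rcases pvB_true k1 k2 x b hb with h1 | h1
        · exact ⟨by omega, Or.inl h1⟩
        · exact ⟨h1.1, Or.inr (by omega)⟩
      · -- pvW y b and pvB x y = true imply pvW x b
        have hyb := hy b hbm
        rcases pvB_true k1 k2 x y hb with h1 | h1 <;>
          · rcases hyb with ⟨h2, h3⟩
            constructor
            · omega
            · rcases h3 with h3 | h3
              · left; omega
              · first
                | (left; omega)
                | (by_cases hc : k1 b < k1 x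
                   · exact Or.inl hc
                   · right; omega)
    · rw [show PySem.List.insertBy (pvB k1 k2) x (y :: ys)
          = if pvB k1 k2 x y = true then x :: y :: ys else y :: PySem.List.insertBy (pvB k1 k2) x ys
        from rfl, if_neg hb]
      refine List.pairwise_cons.2 ⟨?_, ih hys⟩
      intro b hbm
      rcases (PySem.List.mem_insertBy _ _ _ _).1 hbm with heq | hbm
      · simpa [heq] using pvB_false k1 k2 x y (by simpa using hb)
      · exact hy b hbm

lemma pv_foldl_insertBy_pw {α : Type} (k1 k2 : α → Int) (xs : List α) :
    ∀ acc : List α, acc.Pairwise (pvW k1 k2) →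
      (xs.foldl (fun acc x => PySem.List.insertBy (pvB k1 k2) x acc) acc).Pairwise (pvW k1 k2) := by
  induction xs with
  | nil => intro acc h; simpa using h
  | cons x xs ih =>
    intro acc h
    exact ih _ (pv_insertBy_pw k1 k2 x acc h)

lemma pv_sorted2_pw {α : Type} (k1 k2 : α → Int) (xs : List α) :
    (PySem.List.sorted2 xs k1 k2 true).Pairwise (pvW k1 k2) := by
  have : PySem.List.sorted2 xs k1 k2 true
      = xs.foldl (fun acc x => PySem.List.insertBy (pvB k1 k2) x acc) [] := rfl
  rw [this]
  exact pv_foldl_insertBy_pw k1 k2 xs [] List.Pairwise.nil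

lemma pv_sorted2_eq {α : Type} (k1 k2 : α → Int) (xs ys : List α)
    (hperm : xs.Perm ys) (hnd : (xs.map k2).Nodup) :
    PySem.List.sorted2 xs k1 k2 true = PySem.List.sorted2 ys k1 k2 true := by
  have hp : (PySem.List.sorted2 xs k1 k2 true).Perm (PySem.List.sorted2 ys k1 k2 true) :=
    ((PySem.List.sorted2_perm xs k1 k2 true).trans hperm).trans
      (PySem.List.sorted2_perm ys k1 k2 true).symm
  have hpw : xs.Pairwise (fun a b => k2 a ≠ k2 b) := by
    rw [List.Nodup, List.pairwise_map] at hnd; exact hnd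
  refine List.eq_of_perm_of_sorted ?_ (pv_sorted2_pw k1 k2 xs) (pv_sorted2_pw k1 k2 ys) hp
  intro a b ha hbm hab hba
  have hax : a ∈ xs := (PySem.List.sorted2_perm xs k1 k2 true).mem_iff.1 ha
  have hbx : b ∈ xs := hperm.mem_iff.2 ((PySem.List.sorted2_perm ys k1 k2 true).mem_iff.1 hbm)
  by_contra hne
  have : k2 a ≠ k2 b :=
    List.Pairwise.forall (fun u v (h : k2 u ≠ k2 v) => h.symm) hpw hax hbx hne
  rcases hab with ⟨h1, h2⟩
  rcases hba with ⟨h3, h4⟩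
  omega

def pvFresh (s : PySem.Set Int) : List Int → List Int
  | [] => []
  | k :: L => if s.contains k then pvFresh s L else k :: pvFresh (s.add k) L

lemma pvFresh_mem (s : PySem.Set Int) (L : List Int) (y : Int) :
    y ∈ pvFresh s L ↔ y ∈ L ∧ y ∉ s := by
  induction L generalizing s with
  | nil => simp [pvFresh]
  | cons k L ih =>
    by_cases h : s.contains k
    · have hk : k ∈ s := (PySem.Set.contains_iff s k).1 h
      simp only [pvFresh, h, if_pos, List.mem_cons, ih]
      constructor
      · rintro ⟨hy, hns⟩; exact ⟨Or.inr hy, hns⟩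
      · rintro ⟨hy | hy, hns⟩
        · subst hy; exact absurd hk hns
        · exact ⟨hy, hns⟩
    · simp only [pvFresh, h, if_neg, Bool.not_eq_true, List.mem_cons, ih,
        PySem.Set.mem_add]
      have hk : k ∉ s := fun hm => h ((PySem.Set.contains_iff s k).2 hm)
      constructor
      · rintro (rfl | ⟨hy, hns⟩)
        · exact ⟨Or.inl rfl, hk⟩
        · exact ⟨Or.inr hy, fun hm => hns (Or.inl hm)⟩
      · rintro ⟨rfl | hy, hns⟩
        · exact Or.inl rfl
        · by_cases hyk : y = k
          · exact Or.inl hyk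
          · exact Or.inr ⟨hy, fun hm => hns (hm.elim id (fun h => absurd h hyk))⟩

lemma pvFresh_nodup (s : PySem.Set Int) (L : List Int) : (pvFresh s L).Nodup := by
  induction L generalizing s with
  | nil => simp [pvFresh]
  | cons k L ih =>
    by_cases h : s.contains k
    · have hk : k ∈ s := (PySem.Set.contains_iff s k).1 h
      simpa [pvFresh, hk] using ih s
    · simp only [pvFresh, h, if_neg, Bool.not_eq_true, List.nodup_cons]
      refine ⟨fun hm => ?_, ih _⟩
      rcases (pvFresh_mem _ _ _).1 hm with ⟨_, hns⟩
      exact hns (by simp [PySem.Set.mem_add])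

lemma pv_dedup_loop {β : Type} (g : Int → β) (L : List Int) : ∀ (s : PySem.Set Int) (out : List β),
    L.foldl (fun st ky => if st.1.contains ky then st else (st.1.add ky, st.2 ++ [g ky]))
        ((s, out) : PySem.Set Int × List β)
      = (PySem.Set.update s L, out ++ (pvFresh s L).map g) := by
  induction L with
  | nil => intro s out; simp [pvFresh, PySem.Set.update]
  | cons k L ih =>
    intro s out
    by_cases h : s.contains k
    · have hadd : s.add k = s := by unfold PySem.Set.add; rw [if_pos h]
      have hfr : pvFresh s (k :: L) = pvFresh s L := by simp only [pvFresh]; rw [if_pos h]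
      have hup : PySem.Set.update s (k :: L) = PySem.Set.update s L := by
        show PySem.Set.update (s.add k) L = _
        rw [hadd]
      rw [List.foldl_cons]
      show List.foldl _ (if s.contains k = true then (s, out) else (s.add k, out ++ [g k])) L = _
      rw [if_pos h, ih s out, hfr, hup]
    · simp only [List.foldl_cons, h, if_neg, Bool.not_eq_true, ih, pvFresh,
        PySem.Set.update, List.foldl_cons, List.map_cons, List.append_assoc,
        List.singleton_append]

lemma pv_sum_ite (g : Int → Int) (x : Int) : ∀ ys : List Int, ys.Nodup → x ∈ ys →
    (ys.map (fun v => if v = x then g v else 0)).sum = g x := by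
  intro ys
  induction ys with
  | nil => simp
  | cons y ys ihy =>
    intro hnd hx
    rcases List.mem_cons.1 hx with rfl | hm
    · have hny : x ∉ ys := (List.nodup_cons.1 hnd).1
      have hz : ys.map (fun v => if v = x then g v else 0) = ys.map (fun _ => (0:Int)) := by
        apply List.map_congr_left; intro v hv
        have hvx : v ≠ x := fun h => by subst h; exact hny hv
        simp [hvx]
      simp [hz]
    · have hyx : y ≠ x := fun h => by subst h; exact (List.nodup_cons.1 hnd).1 hm
      simp only [List.map_cons, List.sum_cons, hyx, if_neg]
      rw [ihy (List.nodup_cons.1 hnd).2 hm]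
      simp

lemma pv_sum_count (g : Int → Int) (ys : List Int) (hnd : ys.Nodup) :
    ∀ xs : List Int, (∀ x ∈ xs, x ∈ ys) →
      (xs.map g).sum = (ys.map (fun v => (xs.count v : Int) * g v)).sum := by
  intro xs
  induction xs with
  | nil => intro _; simp
  | cons x xs ih =>
    intro hsub
    have hx : x ∈ ys := hsub x (List.mem_cons_self)
    have h1 : (ys.map (fun v => ((x :: xs).count v : Int) * g v))
        = ys.map (fun v => (xs.count v : Int) * g v + if v = x then g v else 0) := by
      apply List.map_congr_left
      intro v hv
      by_cases hvx : v = x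
      · subst hvx; simp [List.count_cons]; push_cast; ring
      · simp [List.count_cons, hvx, Ne.symm hvx]
    have h2 : (ys.map (fun v => if v = x then g v else 0)).sum = g x :=
      pv_sum_ite g x ys hnd hx
    calc ((x :: xs).map g).sum = g x + (xs.map g).sum := by simp
      _ = g x + (ys.map (fun v => (xs.count v : Int) * g v)).sum := by
          rw [ih (fun a ha => hsub a (List.mem_cons_of_mem _ ha))]
      _ = (ys.map (fun v => (xs.count v : Int) * g v + if v = x then g v else 0)).sum := by
          rw [List.sum_map_add]; rw [h2]; ring
      _ = _ := by rw [h1]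


lemma pvScoreB_eq (x : Int) : pvScoreB x = pvScorePrintable x := by
  by_cases hm : x ∈ pvLetters
  · simp only [pvLetters, List.mem_cons, List.not_mem_nil, or_false] at hm
    rcases hm with rfl|rfl|rfl|rfl|rfl|rfl|rfl|rfl|rfl|rfl|rfl|rfl|rfl|rfl|rfl|rfl|rfl|rfl|rfl|rfl|rfl|rfl|rfl|rfl|rfl|rfl|rfl|rfl
    all_goals decide
  · have hc : pvLetterScoreDict.contains x = false := by
      have hkeys : pvLetterScoreDict.keys = pvLetters := by decide
      rw [PySem.Dict.contains_eq_decide_mem_keys, hkeys]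
      exact decide_eq_false hm
    have hg : pvLetterScoreDict.getD x 0 = 0 := PySem.Dict.getD_of_not_contains _ 0 hc
    have hsl : pvScoreLetter x = 0 := by
      unfold pvScoreLetter
      rw [if_neg]
      simpa using hm
    have hd : (pvDigits.contains x = true) ↔ (48 ≤ x ∧ x ≤ 57) := by
      simp [pvDigits]
      omega
    have hp : (pvPrintable.contains x = true) ↔ ((32 ≤ x ∧ x ≤ 127) ∨ x = 10) := by
      simp only [pvPrintable, List.contains_eq_mem, decide_eq_true_eq, List.mem_append,
        List.mem_map, PySem.List.mem_pyRange_one, List.mem_singleton]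
      constructor
      · rintro (⟨i, ⟨h0, h1⟩, rfl⟩ | rfl)
        · left; omega
        · right; rfl
      · rintro (⟨h1, h2⟩ | rfl)
        · exact Or.inl ⟨x - 32, ⟨by omega, by omega⟩, by omega⟩
        · exact Or.inr rfl
    unfold pvScoreB pvScorePrintable
    rw [hg, hsl]
    simp only [hd, hp]

theorem find_byte_key_spec_aux (bin : List Int) : find_byte_key bin = find_byte_key_alt bin := by
  -- the common per-key entry
  have hA : find_byte_key bin
      = PySem.List.sorted2
          ((PySem.Set.ofList ((PySem.List.sorted2
              ((PySem.Set.ofList bin).map (fun x => ((bin.count x : Int), x)))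
              (fun p => p.1) (fun p => p.2) true).flatMap
              (fun a => pvLetters.map (fun b => PySem.Int.bxor a.2 b)))).map
            (fun ky => (pvScoreReadable (pvBinxorbyte bin ky), ky, pvBinxorbyte bin ky)))
          (fun t => t.1) (fun t => t.2.1) true := by
    unfold find_byte_key
    dsimp only
    rw [PySem.List.foldl_append_singleton_eq_map]
    rw [List.nil_append]
  have hB : find_byte_key_alt bin
      = PySem.List.sorted2
          ((pvFresh PySem.Set.empty
              ((PySem.Set.ofList bin).flatMap (fun v => pvLetters.map (fun c => PySem.Int.bxor v c)))).map
            (fun ky => (((PySem.Dict.counter bin).items.map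
                (fun p => p.2 * pvScoreB (PySem.Int.bxor p.1 ky))).sum,
              ky, bin.map (fun a => PySem.Int.bxor a ky))))
          (fun t => t.1) (fun t => t.2.1) true := by
    unfold find_byte_key_alt
    dsimp only
    rw [PySem.Dict.foldl_insert_getD_add_one_eq_counter, PySem.Dict.keys_counter]
    rw [show (fun (st : PySem.Set Int × List (Int × Int × List Int)) (v : Int) =>
        pvLetters.foldl (fun st c =>
          let ky := PySem.Int.bxor v c
          if st.1.contains ky then st
          else (st.1.add ky,
                st.2 ++ [(((PySem.Dict.counter bin).items.map
                    (fun p => p.2 * pvScoreB (PySem.Int.bxor p.1 ky))).sum,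
                  ky, bin.map (fun a => PySem.Int.bxor a ky))])) st)
      = (fun st v => (pvLetters.map (fun c => PySem.Int.bxor v c)).foldl
          (fun st ky =>
            if st.1.contains ky then st
            else (st.1.add ky,
                  st.2 ++ [(((PySem.Dict.counter bin).items.map
                      (fun p => p.2 * pvScoreB (PySem.Int.bxor p.1 ky))).sum,
                    ky, bin.map (fun a => PySem.Int.bxor a ky))])) st)
      from by funext st v; rw [List.foldl_map]]
    rw [← List.foldl_flatMap, pv_dedup_loop, List.nil_append]
  rw [hA, hB]
  have hhisto : ∀ a : Int × Int,
      a ∈ (PySem.List.sorted2 ((PySem.Set.ofList bin).map (fun x => ((bin.count x : Int), x)))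
            (fun p => p.1) (fun p => p.2) true)
      ↔ a ∈ (PySem.Set.ofList bin).map (fun x => ((bin.count x : Int), x)) :=
    fun a => (PySem.List.sorted2_perm _ _ _ _).mem_iff
  have hKperm : (PySem.Set.ofList ((PySem.List.sorted2
        ((PySem.Set.ofList bin).map (fun x => ((bin.count x : Int), x)))
        (fun p => p.1) (fun p => p.2) true).flatMap
        (fun a => pvLetters.map (fun b => PySem.Int.bxor a.2 b)))).Perm
      (pvFresh PySem.Set.empty
        ((PySem.Set.ofList bin).flatMap (fun v => pvLetters.map (fun c => PySem.Int.bxor v c)))) := by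
    rw [List.perm_ext_iff_of_nodup (PySem.Set.nodup_ofList _) (pvFresh_nodup _ _)]
    intro y
    rw [pvFresh_mem]
    simp only [PySem.Set.mem_ofList, List.mem_flatMap, List.mem_map, hhisto]
    constructor
    · rintro ⟨a, ⟨v, hv, rfl⟩, b, hb, rfl⟩
      refine ⟨⟨v, hv, b, hb, rfl⟩, ?_⟩
      simp [PySem.Set.empty]
    · rintro ⟨⟨v, hv, b, hb, rfl⟩, -⟩
      exact ⟨((bin.count v : Int), v), ⟨v, hv, rfl⟩, b, hb, rfl⟩
  have hg : ∀ ky : Int,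
      (((PySem.Dict.counter bin).items.map (fun p => p.2 * pvScoreB (PySem.Int.bxor p.1 ky))).sum,
        ky, bin.map (fun a => PySem.Int.bxor a ky))
      = (pvScoreReadable (pvBinxorbyte bin ky), ky, pvBinxorbyte bin ky) := by
    intro ky
    have h1 : ((PySem.Dict.counter bin).items.map
        (fun p => p.2 * pvScoreB (PySem.Int.bxor p.1 ky))).sum
        = pvScoreReadable (pvBinxorbyte bin ky) := by
      rw [PySem.Dict.items_counter, List.map_map]
      have h2 : ((fun p : Int × Int => p.2 * pvScoreB (PySem.Int.bxor p.1 ky))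
          ∘ (fun k => (k, (bin.count k : Int))))
          = fun v => (bin.count v : Int) * pvScorePrintable (PySem.Int.bxor v ky) := by
        funext v
        simp [pvScoreB_eq]
      rw [h2]
      have h3 := pv_sum_count (fun a => pvScorePrintable (PySem.Int.bxor a ky))
        (PySem.Set.ofList bin) (PySem.Set.nodup_ofList bin) bin
        (fun x hx => (PySem.Set.mem_ofList bin x).2 hx)
      rw [← h3]
      unfold pvScoreReadable pvBinxorbyte
      rw [List.map_map]
      rfl
    rw [h1]
    rfl
  rw [List.map_congr_left (fun ky _ => hg ky)]
  apply pv_sorted2_eq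
  · exact hKperm.map _
  · rw [List.map_map]
    have hid : ((fun (t : Int × Int × List Int) => t.2.1)
        ∘ (fun ky => (pvScoreReadable (pvBinxorbyte bin ky), ky, pvBinxorbyte bin ky)))
        = fun ky => ky := rfl
    rw [hid]
    have := PySem.Set.nodup_ofList ((PySem.List.sorted2
        ((PySem.Set.ofList bin).map (fun x => ((bin.count x : Int), x)))
        (fun p => p.1) (fun p => p.2) true).flatMap
        (fun a => pvLetters.map (fun b => PySem.Int.bxor a.2 b)))
    simpa using this

-- ===== VERDICT (by name: the statement is the Claim_ definition above) =====
theorem find_byte_key_spec : Claim_equal_find_byte_key := by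
  intro bin _ _
  unfold Spec_find_byte_key
  exact find_byte_key_spec_aux bin
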